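-- pv_equiv track=rewrite | github.com/onyuki/1400-zadach-po-programmirivaniu | 5.73-5.94.py | count_sum_digits_in_range
-- ===== SOURCE A (Python) =====
-- def count_sum_digits_in_range(a, b, target):
--     def sum_digits(x):
--         s = 0
--         while x:
--             s += x % 10
--             x //= 10
--         return s
--     cnt = 0
--     for x in range(a, b + 1):
--         if sum_digits(x) == target:
--             cnt += 1
--     return cnt
-- ===== SOURCE B (Python) =====
-- def count_sum_digits_in_range(a, b, target):
--     # Digit DP: tables(m) returns (c_m, c_{m-1}, c_{m-2}) where c_k[s] = how many
--     # x in [0, k] have digit sum s (empty table for k < 0).  Answer = c_b[target] - c_{a-1}[target].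
--     def g(c, s):
--         return c[s] if 0 <= s < len(c) else 0
--
--     def mix(dd, hi, lo):
--         # counts for m' = 10*q + dd from hi = c_q and lo = c_{q-1}:
--         # c_{m'}[s] = sum_{r=0..dd} c_q[s-r] + sum_{r=dd+1..9} c_{q-1}[s-r]
--         L = 0 if (not hi and not lo) else max(len(hi), len(lo)) + 9
--         out = []
--         for s in range(L):
--             t = 0
--             for r in range(10):
--                 t += g(hi if r <= dd else lo, s - r)
--             out.append(t)
--         return out
--
--     def tables(m):
--         if m < 0:
--             return ([], [], [])
--         if m == 0:
--             return ([1], [], [])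
--         q, d = divmod(m, 10)
--         cq, cq1, cq2 = tables(q)
--         c0 = mix(d, cq, cq1)
--         c1 = mix(d - 1, cq, cq1) if d >= 1 else mix(9, cq1, cq2)
--         if d >= 2:
--             c2 = mix(d - 2, cq, cq1)
--         elif d == 1:
--             c2 = mix(9, cq1, cq2)
--         else:
--             c2 = mix(8, cq1, cq2)
--         return (c0, c1, c2)
--
--     if a > b:
--         return 0
--     return g(tables(b)[0], target) - g(tables(a - 1)[0], target)
-- ===== Notes on version B (the rewrite author's own statement) =====
-- stated objective: faster
-- what changed: Replaces A's per-element scan of [a,b] (computing each number's digit sum) by a digit DP: tables of digit-sum counts for prefixes [0,m] built by recursion on m//10, answering with counts(b) - counts(a-1).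
import Mathlib
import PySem

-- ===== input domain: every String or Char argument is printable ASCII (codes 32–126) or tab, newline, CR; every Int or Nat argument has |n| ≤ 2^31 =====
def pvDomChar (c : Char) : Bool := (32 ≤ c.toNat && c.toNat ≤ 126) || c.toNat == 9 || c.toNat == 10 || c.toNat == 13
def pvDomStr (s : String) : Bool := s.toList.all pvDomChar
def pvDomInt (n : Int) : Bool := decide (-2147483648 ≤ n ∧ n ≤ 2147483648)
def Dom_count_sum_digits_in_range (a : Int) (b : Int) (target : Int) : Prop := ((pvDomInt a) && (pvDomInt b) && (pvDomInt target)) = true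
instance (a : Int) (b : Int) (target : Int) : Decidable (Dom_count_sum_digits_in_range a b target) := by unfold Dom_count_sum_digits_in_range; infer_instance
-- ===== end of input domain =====

-- B replaces A's per-element scan of [a, b] by a digit-DP table of digit-sum counts
-- (objective: faster, O(log^2 b) vs O((b-a)·log b)).

-- ===== PORT A =====
-- sum_digits: s = 0; while x: s += x % 10; x //= 10.  The recursion guard is 0 < x:
-- for x < 0 Python's loop never terminates (x //= 10 stalls at -1), such x are outside Pre_.
def pvSumDigits (x : Int) (s : Int) : Int :=
  if 0 < x then pvSumDigits (PySem.Int.floordiv x 10) (s + PySem.Int.mod x 10) else s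
termination_by x.toNat
decreasing_by
  have h1 : PySem.Int.floordiv x 10 = ((x.toNat / 10 : Nat) : Int) := by
    rw [show x = ((x.toNat : Nat) : Int) by omega]
    exact_mod_cast PySem.Int.floordiv_natCast x.toNat 10
  have h2 : x.toNat / 10 < x.toNat := Nat.div_lt_self (by omega) (by norm_num)
  omega

def count_sum_digits_in_range (a : Int) (b : Int) (target : Int) : Int :=
  (PySem.List.pyRange a (b + 1) 1).foldl
    (fun cnt x => if pvSumDigits x 0 = target then cnt + 1 else cnt) 0

-- ===== PORT B =====
-- g(c, s): c[s] if 0 <= s < len(c) else 0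
def pvTblGet (c : List Int) (s : Int) : Int :=
  if 0 ≤ s ∧ s < (c.length : Int) then PySem.List.pyGetD c s 0 else 0

-- mix(dd, hi, lo): out[s] = sum over r in range(10) of g(hi if r <= dd else lo, s - r)
def pvMix (dd : Int) (hi lo : List Int) : List Int :=
  let L : Nat := if hi = [] ∧ lo = [] then 0 else max hi.length lo.length + 9
  (List.range L).map (fun (s : Nat) =>
    (List.range 10).foldl
      (fun (t : Int) (r : Nat) => t + pvTblGet (if (r : Int) ≤ dd then hi else lo) ((s : Int) - (r : Int))) 0)

-- tables(m) = (c_m, c_{m-1}, c_{m-2})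
def pvTables (m : Int) : List Int × List Int × List Int :=
  if m < 0 then ([], [], [])
  else if m = 0 then ([1], [], [])
  else
    let q := PySem.Int.floordiv m 10
    let d := PySem.Int.mod m 10
    let t := pvTables q
    let cq := t.1
    let cq1 := t.2.1
    let cq2 := t.2.2
    (pvMix d cq cq1,
     if 1 ≤ d then pvMix (d - 1) cq cq1 else pvMix 9 cq1 cq2,
     if 2 ≤ d then pvMix (d - 2) cq cq1
     else if d = 1 then pvMix 9 cq1 cq2 else pvMix 8 cq1 cq2)
termination_by m.toNat
decreasing_by
  have h1 : PySem.Int.floordiv m 10 = ((m.toNat / 10 : Nat) : Int) := by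
    rw [show m = ((m.toNat : Nat) : Int) by omega]
    exact_mod_cast PySem.Int.floordiv_natCast m.toNat 10
  have h2 : m.toNat / 10 < m.toNat := Nat.div_lt_self (by omega) (by norm_num)
  omega

def count_sum_digits_in_range_alt (a : Int) (b : Int) (target : Int) : Int :=
  if a > b then 0
  else pvTblGet (pvTables b).1 target - pvTblGet (pvTables (a - 1)).1 target

-- ===== PRECONDITION & SPEC =====
-- Pre_ excludes nonempty ranges that contain a negative number: there Python's
-- sum_digits loops forever (x //= 10 stalls at -1), so A never returns.
def Pre_count_sum_digits_in_range (a : Int) (b : Int) (target : Int) : Prop :=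
  0 ≤ a ∨ b < a
instance (a : Int) (b : Int) (target : Int) : Decidable (Pre_count_sum_digits_in_range a b target) := by unfold Pre_count_sum_digits_in_range; infer_instance

def pvWitness_count_sum_digits_in_range : Int × Int × Int := (0, 12, 3)

def Spec_count_sum_digits_in_range (a : Int) (b : Int) (target : Int) (out : Int) : Prop := out = count_sum_digits_in_range_alt a b target
instance (a : Int) (b : Int) (target : Int) (out : Int) : Decidable (Spec_count_sum_digits_in_range a b target out) := by unfold Spec_count_sum_digits_in_range; infer_instance

-- ===== CLAIM (what is proved, stated in full; the proofs are below) =====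
def Claim_equal_count_sum_digits_in_range : Prop := ∀ (a : Int) (b : Int) (target : Int), Dom_count_sum_digits_in_range a b target → Pre_count_sum_digits_in_range a b target → Spec_count_sum_digits_in_range a b target (count_sum_digits_in_range a b target)

-- ===== LEMMAS AND PROOFS =====

-- N m t = #{x ∈ [0, m] : digit sum of x = t}, the common mathematical object.
def pvN (m : Int) (t : Int) : Int :=
  if 0 ≤ m then pvN (m - 1) t + (if pvSumDigits m 0 = t then 1 else 0) else 0
termination_by (m + 1).toNat
decreasing_by omega

theorem pvFdiv10_lt (x : Int) (h : 0 < x) : (PySem.Int.floordiv x 10).toNat < x.toNat := by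
  have h1 : PySem.Int.floordiv x 10 = ((x.toNat / 10 : Nat) : Int) := by
    rw [show x = ((x.toNat : Nat) : Int) by omega]
    exact_mod_cast PySem.Int.floordiv_natCast x.toNat 10
  have h2 : x.toNat / 10 < x.toNat := Nat.div_lt_self (by omega) (by norm_num)
  omega

theorem pvDivmod10 (m : Int) :
    m = 10 * PySem.Int.floordiv m 10 + PySem.Int.mod m 10 ∧
    0 ≤ PySem.Int.mod m 10 ∧ PySem.Int.mod m 10 < 10 := by
  have h1 := PySem.Int.floordiv_mul_add_mod m 10
  have h2 := PySem.Int.mod_nonneg m (b := 10) (by norm_num)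
  have h3 := PySem.Int.mod_lt m (b := 10) (by norm_num)
  omega

theorem pvSumDigits_eq (x s : Int) :
    pvSumDigits x s =
      if 0 < x then pvSumDigits (PySem.Int.floordiv x 10) (s + PySem.Int.mod x 10) else s := by
  rw [pvSumDigits]

theorem pvSumDigits_acc (x s : Int) : pvSumDigits x s = s + pvSumDigits x 0 := by
  induction hn : x.toNat using Nat.strong_induction_on generalizing x s with
  | _ n ih =>
    by_cases h : 0 < x
    · rw [pvSumDigits_eq x s, pvSumDigits_eq x 0, if_pos h, if_pos h]
      subst hn
      rw [ih _ (pvFdiv10_lt x h) _ _ rfl,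
          ih _ (pvFdiv10_lt x h) _ (0 + PySem.Int.mod x 10) rfl]
      ring
    · rw [pvSumDigits_eq x s, pvSumDigits_eq x 0, if_neg h, if_neg h]
      ring

theorem pvSumDigits_step (x : Int) (h : 0 < x) :
    pvSumDigits x 0 = PySem.Int.mod x 10 + pvSumDigits (PySem.Int.floordiv x 10) 0 := by
  rw [pvSumDigits_eq, if_pos h, pvSumDigits_acc]
  ring

theorem pvSumDigits_split (q r : Int) (hq : 0 ≤ q) (hr : 0 ≤ r) (hr10 : r < 10) :
    pvSumDigits (10 * q + r) 0 = pvSumDigits q 0 + r := by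
  by_cases h : 0 < 10 * q + r
  · rw [pvSumDigits_step _ h]
    have hmod : PySem.Int.mod (10 * q + r) 10 = r := by
      have h1 := pvDivmod10 (10 * q + r)
      have h2 : PySem.Int.floordiv (10 * q + r) 10 = q :=
        (PySem.Int.floordiv_eq_iff_of_pos (by norm_num)).2 (by constructor <;> omega)
      omega
    have hdiv : PySem.Int.floordiv (10 * q + r) 10 = q :=
      (PySem.Int.floordiv_eq_iff_of_pos (by norm_num)).2 (by constructor <;> omega)
    rw [hmod, hdiv]
    ring
  · have hq0 : q = 0 := by omega
    have hr0 : r = 0 := by omega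
    subst hq0 hr0
    norm_num

theorem pvN_eq (m t : Int) :
    pvN m t = if 0 ≤ m then pvN (m - 1) t + (if pvSumDigits m 0 = t then 1 else 0) else 0 := by
  rw [pvN]

theorem pvN_neg_m (m t : Int) (h : m < 0) : pvN m t = 0 := by
  rw [pvN_eq, if_neg (by omega)]

theorem pvFdiv_pred (a : Int) (h : PySem.Int.mod a 10 ≠ 0) :
    PySem.Int.floordiv (a - 1) 10 = PySem.Int.floordiv a 10 := by
  have h1 := pvDivmod10 a
  exact (PySem.Int.floordiv_eq_iff_of_pos (by norm_num)).2 (by constructor <;> omega)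

-- partition at m = -1 and all m ≥ 0 (needed down to -1 for the induction base)
theorem pvN_partition' (m t : Int) (hm : -1 ≤ m) :
    pvN m t = ∑ r ∈ Finset.range 10, pvN (PySem.Int.floordiv (m - (r : Int)) 10) (t - (r : Int)) := by
  induction hn : (m + 1).toNat using Nat.strong_induction_on generalizing m t with
  | _ n ih =>
    by_cases h : 0 ≤ m
    · -- m ≥ 0 : peel one element off [0, m] on both sides
      obtain ⟨hm_eq, hd0, hd10⟩ := pvDivmod10 m
      have hq0 : 0 ≤ PySem.Int.floordiv m 10 := by omega
      have key : ∀ r ∈ Finset.range 10,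
          pvN (PySem.Int.floordiv (m - (r : Int)) 10) (t - (r : Int)) =
          pvN (PySem.Int.floordiv (m - 1 - (r : Int)) 10) (t - (r : Int)) +
            (if r = (PySem.Int.mod m 10).toNat then (if pvSumDigits m 0 = t then 1 else 0) else 0) := by
        intro r hr
        have hr10 : r < 10 := Finset.mem_range.1 hr
        by_cases hrd : r = (PySem.Int.mod m 10).toNat
        · have hrd' : (r : Int) = PySem.Int.mod m 10 := by omega
          have hfa : PySem.Int.floordiv (m - (r : Int)) 10 = PySem.Int.floordiv m 10 :=
            (PySem.Int.floordiv_eq_iff_of_pos (by norm_num)).2 (by constructor <;> omega)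
          have hfb : PySem.Int.floordiv (m - 1 - (r : Int)) 10 = PySem.Int.floordiv m 10 - 1 :=
            (PySem.Int.floordiv_eq_iff_of_pos (by norm_num)).2 (by constructor <;> omega)
          rw [hfa, hfb, if_pos hrd]
          rw [pvN_eq (PySem.Int.floordiv m 10), if_pos hq0]
          have hsd : pvSumDigits m 0 = pvSumDigits (PySem.Int.floordiv m 10) 0 + PySem.Int.mod m 10 := by
            conv_lhs => rw [hm_eq]
            exact pvSumDigits_split _ _ hq0 hd0 hd10
          have hiff : (pvSumDigits (PySem.Int.floordiv m 10) 0 = t - (r : Int)) ↔ (pvSumDigits m 0 = t) := by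
            omega
          by_cases hc : pvSumDigits m 0 = t
          · rw [if_pos (hiff.2 hc), if_pos hc]
          · rw [if_neg (fun hx => hc (hiff.1 hx)), if_neg hc]
        · have hmod : PySem.Int.mod (m - (r : Int)) 10 ≠ 0 := by
            have h2 := pvDivmod10 (m - (r : Int))
            omega
          rw [show m - 1 - (r : Int) = m - (r : Int) - 1 by ring, pvFdiv_pred _ hmod,
              if_neg hrd, add_zero]
      rw [pvN_eq, if_pos h, ih m.toNat (by omega) (m - 1) t (by omega) (by omega),
          Finset.sum_congr rfl key, Finset.sum_add_distrib, Finset.sum_ite_eq']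
      rw [if_pos (Finset.mem_range.2 (by omega))]
    · -- m = -1 : both sides are 0
      have hm1 : m = -1 := by omega
      subst hm1
      rw [pvN_neg_m _ _ (by norm_num)]
      have key : ∀ r ∈ Finset.range 10,
          pvN (PySem.Int.floordiv (-1 - (r : Int)) 10) (t - (r : Int)) = 0 := by
        intro r hr
        have hr10 : r < 10 := Finset.mem_range.1 hr
        have hf : PySem.Int.floordiv (-1 - (r : Int)) 10 = -1 :=
          (PySem.Int.floordiv_eq_iff_of_pos (by norm_num)).2 (by constructor <;> omega)
        rw [hf, pvN_neg_m _ _ (by norm_num)]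
      rw [Finset.sum_congr rfl key, Finset.sum_const, smul_zero]

def pvTbl (c : List Int) (m : Int) : Prop := ∀ s : Int, pvTblGet c s = pvN m s

theorem pvTblGet_eq_zero (c : List Int) (s : Int) (h : ¬(0 ≤ s ∧ s < (c.length : Int))) :
    pvTblGet c s = 0 := by
  rw [pvTblGet, if_neg h]

theorem pvSumRange (f : ℕ → ℤ) (n : ℕ) : ((List.range n).map f).sum = ∑ r ∈ Finset.range n, f r := rfl

theorem pvMix_length (dd : Int) (hi lo : List Int) :
    (pvMix dd hi lo).length = if hi = [] ∧ lo = [] then 0 else max hi.length lo.length + 9 := by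
  simp [pvMix]

theorem pvMix_getElem (dd : Int) (hi lo : List Int) (k : Nat) (hk : k < (pvMix dd hi lo).length) :
    (pvMix dd hi lo)[k] = ∑ r ∈ Finset.range 10,
      pvTblGet (if (r : Int) ≤ dd then hi else lo) ((k : Int) - (r : Int)) := by
  simp only [pvMix, List.getElem_map, List.getElem_range, PySem.List.foldl_add, zero_add]
  rw [pvSumRange]

theorem pvFdiv_digit (q dd r : Int) (h0 : 0 ≤ dd) (h1 : dd < 10) (hr0 : 0 ≤ r) (hr : r < 10) :
    PySem.Int.floordiv (10 * q + dd - r) 10 = if r ≤ dd then q else q - 1 := by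
  split_ifs with h
  · exact (PySem.Int.floordiv_eq_iff_of_pos (by norm_num)).2 (by constructor <;> omega)
  · exact (PySem.Int.floordiv_eq_iff_of_pos (by norm_num)).2 (by constructor <;> omega)

theorem pvMix_correct (dd : Int) (hi lo : List Int) (q : Int)
    (hhi : pvTbl hi q) (hlo : pvTbl lo (q - 1)) (h0 : 0 ≤ dd) (h1 : dd < 10) :
    pvTbl (pvMix dd hi lo) (10 * q + dd) := by
  have hC : ∀ s' : Int, pvN (10 * q + dd) s' =
      ∑ r ∈ Finset.range 10, pvTblGet (if (r : Int) ≤ dd then hi else lo) (s' - (r : Int)) := by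
    intro s'
    by_cases hm : 0 ≤ 10 * q + dd
    · rw [pvN_partition' _ _ (by omega)]
      refine Finset.sum_congr rfl ?_
      intro r hr
      have hr10 : r < 10 := Finset.mem_range.1 hr
      rw [pvFdiv_digit q dd r h0 h1 (by omega) (by exact_mod_cast hr10)]
      by_cases hrd : (r : Int) ≤ dd
      · rw [if_pos hrd, if_pos hrd, hhi]
      · rw [if_neg hrd, if_neg hrd, hlo]
    · rw [pvN_neg_m _ _ (by omega)]
      symm
      apply Finset.sum_eq_zero
      intro r hr
      by_cases hrd : (r : Int) ≤ dd
      · rw [if_pos hrd, hhi, pvN_neg_m _ _ (by omega)]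
      · rw [if_neg hrd, hlo, pvN_neg_m _ _ (by omega)]
  intro s
  by_cases hs : 0 ≤ s ∧ s < ((pvMix dd hi lo).length : Int)
  · rw [pvTblGet, if_pos hs, PySem.List.pyGetD_eq_getElem _ _ hs.1 hs.2,
        pvMix_getElem dd hi lo s.toNat (by omega), hC s]
    congr 1
    ext r
    congr 2
    omega
  · rw [pvTblGet_eq_zero _ _ hs, hC s]
    symm
    apply Finset.sum_eq_zero
    intro r hr
    have hr10 : r < 10 := Finset.mem_range.1 hr
    have hlen := pvMix_length dd hi lo
    by_cases he : hi = [] ∧ lo = []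
    · rw [if_pos he] at hlen
      by_cases hrd : (r : Int) ≤ dd
      · rw [if_pos hrd]
        apply pvTblGet_eq_zero
        rw [he.1]
        simp
      · rw [if_neg hrd]
        apply pvTblGet_eq_zero
        rw [he.2]
        simp
    · rw [if_neg he] at hlen
      have hsl : ¬(0 ≤ s ∧ s < ((max hi.length lo.length + 9 : Nat) : Int)) := by
        rw [hlen] at hs
        exact_mod_cast hs
      by_cases hrd : (r : Int) ≤ dd
      · rw [if_pos hrd]
        apply pvTblGet_eq_zero
        have : hi.length ≤ max hi.length lo.length := le_max_left _ _
        push_cast at hsl ⊢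
        omega
      · rw [if_neg hrd]
        apply pvTblGet_eq_zero
        have : lo.length ≤ max hi.length lo.length := le_max_right _ _
        push_cast at hsl ⊢
        omega

theorem pvTbl_nil (k : Int) (hk : k < 0) : pvTbl [] k := by
  intro s
  rw [pvTblGet_eq_zero _ _ (by simp), pvN_neg_m _ _ hk]

theorem pvTbl_zero : pvTbl [1] 0 := by
  intro s
  have hsd : pvSumDigits 0 0 = 0 := by rw [pvSumDigits_eq, if_neg (by norm_num)]
  rw [pvN_eq, if_pos (le_refl 0), pvN_neg_m (0 - 1) s (by norm_num), hsd]
  by_cases h0 : s = 0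
  · subst h0
    rw [if_pos rfl, pvTblGet, if_pos (by constructor <;> norm_num)]
    decide
  · rw [if_neg (fun h => h0 h.symm), pvTblGet_eq_zero _ _ (by simp only [List.length_cons, List.length_nil]; push_cast; omega)]
    norm_num

theorem pvTables_eq_pos (m : Int) (h : 0 < m) :
    pvTables m =
      (pvMix (PySem.Int.mod m 10) (pvTables (PySem.Int.floordiv m 10)).1
         (pvTables (PySem.Int.floordiv m 10)).2.1,
       if 1 ≤ PySem.Int.mod m 10 then
         pvMix (PySem.Int.mod m 10 - 1) (pvTables (PySem.Int.floordiv m 10)).1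
           (pvTables (PySem.Int.floordiv m 10)).2.1
       else pvMix 9 (pvTables (PySem.Int.floordiv m 10)).2.1 (pvTables (PySem.Int.floordiv m 10)).2.2,
       if 2 ≤ PySem.Int.mod m 10 then
         pvMix (PySem.Int.mod m 10 - 2) (pvTables (PySem.Int.floordiv m 10)).1
           (pvTables (PySem.Int.floordiv m 10)).2.1
       else if PySem.Int.mod m 10 = 1 then
         pvMix 9 (pvTables (PySem.Int.floordiv m 10)).2.1 (pvTables (PySem.Int.floordiv m 10)).2.2
       else pvMix 8 (pvTables (PySem.Int.floordiv m 10)).2.1 (pvTables (PySem.Int.floordiv m 10)).2.2) := by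
  rw [pvTables]
  rw [if_neg (by omega), if_neg (by omega)]

theorem pvTables_correct (m : Int) :
    pvTbl (pvTables m).1 m ∧ pvTbl (pvTables m).2.1 (m - 1) ∧ pvTbl (pvTables m).2.2 (m - 2) := by
  induction hn : (m + 1).toNat using Nat.strong_induction_on generalizing m with
  | _ n ih =>
    by_cases hneg : m < 0
    · rw [pvTables, if_pos hneg]
      exact ⟨pvTbl_nil _ hneg, pvTbl_nil _ (by omega), pvTbl_nil _ (by omega)⟩
    · by_cases hz : m = 0
      · subst hz
        rw [pvTables]
        norm_num
        exact ⟨pvTbl_zero, pvTbl_nil _ (by norm_num), pvTbl_nil _ (by norm_num)⟩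
      · have hm : 0 < m := by omega
        obtain ⟨hm_eq, hd0, hd10⟩ := pvDivmod10 m
        have hq0 : 0 ≤ PySem.Int.floordiv m 10 := by omega
        have hqlt := pvFdiv10_lt m hm
        obtain ⟨hq1, hq2, hq3⟩ := ih ((PySem.Int.floordiv m 10) + 1).toNat (by omega) _ rfl
        rw [pvTables_eq_pos m hm]
        refine ⟨?_, ?_, ?_⟩
        · have := pvMix_correct _ _ _ _ hq1 hq2 hd0 hd10
          rwa [show 10 * PySem.Int.floordiv m 10 + PySem.Int.mod m 10 = m by omega] at this
        · by_cases hd1 : 1 ≤ PySem.Int.mod m 10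
          · rw [if_pos hd1]
            have := pvMix_correct (PySem.Int.mod m 10 - 1) _ _ _ hq1 hq2 (by omega) (by omega)
            rwa [show 10 * PySem.Int.floordiv m 10 + (PySem.Int.mod m 10 - 1) = m - 1 by omega] at this
          · rw [if_neg hd1]
            have := pvMix_correct 9 _ _ _ hq2 (by rwa [show PySem.Int.floordiv m 10 - 1 - 1 = PySem.Int.floordiv m 10 - 2 by ring]) (by norm_num) (by norm_num)
            rwa [show 10 * (PySem.Int.floordiv m 10 - 1) + 9 = m - 1 by omega] at this
        · by_cases hd2 : 2 ≤ PySem.Int.mod m 10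
          · rw [if_pos hd2]
            have := pvMix_correct (PySem.Int.mod m 10 - 2) _ _ _ hq1 hq2 (by omega) (by omega)
            rwa [show 10 * PySem.Int.floordiv m 10 + (PySem.Int.mod m 10 - 2) = m - 2 by omega] at this
          · rw [if_neg hd2]
            by_cases hd1 : PySem.Int.mod m 10 = 1
            · rw [if_pos hd1]
              have := pvMix_correct 9 _ _ _ hq2 (by rwa [show PySem.Int.floordiv m 10 - 1 - 1 = PySem.Int.floordiv m 10 - 2 by ring]) (by norm_num) (by norm_num)
              rwa [show 10 * (PySem.Int.floordiv m 10 - 1) + 9 = m - 2 by omega] at this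
            · rw [if_neg hd1]
              have := pvMix_correct 8 _ _ _ hq2 (by rwa [show PySem.Int.floordiv m 10 - 1 - 1 = PySem.Int.floordiv m 10 - 2 by ring]) (by norm_num) (by norm_num)
              rwa [show 10 * (PySem.Int.floordiv m 10 - 1) + 8 = m - 2 by omega] at this

theorem pvFold_count (k : Nat) (a t : Int) (ha : 0 ≤ a) :
    (PySem.List.pyRange a (a + (k : Int)) 1).foldl
      (fun cnt x => if pvSumDigits x 0 = t then cnt + 1 else cnt) 0
      = pvN (a + (k : Int) - 1) t - pvN (a - 1) t := by
  induction k with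
  | zero =>
    rw [show a + ((0 : Nat) : Int) = a by push_cast; ring, PySem.List.pyRange_one_eq_nil le_rfl]
    simp
  | succ k ih =>
    rw [show a + ((k + 1 : Nat) : Int) = (a + (k : Int)) + 1 by push_cast; ring,
        PySem.List.pyRange_one_succ_right (by omega : a ≤ a + (k : Int)),
        List.foldl_append, ih]
    simp only [List.foldl_cons, List.foldl_nil]
    rw [show a + (k : Int) + 1 - 1 = a + (k : Int) by ring, pvN_eq (a + (k : Int)) t,
        if_pos (show (0 : Int) ≤ a + (k : Int) by omega)]
    by_cases hc : pvSumDigits (a + (k : Int)) 0 = t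
    · rw [if_pos hc, if_pos hc]
      ring
    · rw [if_neg hc, if_neg hc]
      ring

-- ===== VERDICT (by name: the statement is the Claim_ definition above) =====
theorem count_sum_digits_in_range_spec : Claim_equal_count_sum_digits_in_range := by
  intro a b target _ hpre
  unfold Spec_count_sum_digits_in_range count_sum_digits_in_range count_sum_digits_in_range_alt
  by_cases hgt : a > b
  · rw [if_pos hgt, PySem.List.pyRange_one_eq_nil (by omega)]
    rfl
  · have ha : 0 ≤ a := by rcases hpre with h | h; exact h; omega
    rw [if_neg hgt]
    have hk : b + 1 = a + ((b + 1 - a).toNat : Int) := by omega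
    rw [hk, pvFold_count _ _ _ ha]
    have h1 := (pvTables_correct b).1
    have h2 := (pvTables_correct (a - 1)).1
    rw [h1 target, h2 target]
    congr 2
    omega
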